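-- pv_equiv track=rewrite | github.com/AnaClaraZoppiSerpa/diffusion-studies-supporting-codes | GA_code/crossover_functions.py | alternating_crossover
-- ===== SOURCE A (Python) =====
-- def alternating_crossover(parent1, parent2):
--     # Assuming parent1 and parent2 have the same dimensions
--
--     # Get the dimensions of the parents
--     rows = len(parent1)
--     cols = len(parent1[0])
--
--     # Create an empty child matrix
--     child1 = [[0] * cols for _ in range(rows)]
--     child2 = [[0] * cols for _ in range(rows)]
--
--     # Perform alternating crossover
--     for i in range(rows):
--         for j in range(cols):
--             if (i + j) % 2 == 0:
--                 child1[i][j] = parent1[i][j]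
--                 child2[i][j] = parent2[i][j]
--             else:
--                 child1[i][j] = parent2[i][j]
--                 child2[i][j] = parent1[i][j]
--
--     return child1, child2
-- ===== SOURCE B (Python) =====
-- def alternating_crossover(parent1, parent2):
--     # Row-by-row: two bulk strided copies per child row instead of a
--     # per-cell (i+j) parity test.
--     cols = len(parent1[0])
--     child1, child2 = [], []
--     for i, (r1, r2) in enumerate(zip(parent1, parent2)):
--         a, b = (r1, r2) if i % 2 == 0 else (r2, r1)
--         row1 = [0] * cols
--         row1[0::2] = a[0:cols:2]
--         row1[1::2] = b[1:cols:2]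
--         row2 = [0] * cols
--         row2[0::2] = b[0:cols:2]
--         row2[1::2] = a[1:cols:2]
--         child1.append(row1)
--         child2.append(row2)
--     return child1, child2
-- ===== Notes on version B (the rewrite author's own statement) =====
-- stated objective: faster
-- what changed: B builds the two children row by row, assembling each child row with two bulk strided slice copies (row[0::2]/row[1::2]) per parent instead of A's per-cell inner loop with an (i+j)%2 parity test.
-- outside the precondition, e.g. on alternating_crossover([[], []], [[]]): A returns ([[], []], [[], []]), B returns ([[]], [[]])
import Mathlib
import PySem

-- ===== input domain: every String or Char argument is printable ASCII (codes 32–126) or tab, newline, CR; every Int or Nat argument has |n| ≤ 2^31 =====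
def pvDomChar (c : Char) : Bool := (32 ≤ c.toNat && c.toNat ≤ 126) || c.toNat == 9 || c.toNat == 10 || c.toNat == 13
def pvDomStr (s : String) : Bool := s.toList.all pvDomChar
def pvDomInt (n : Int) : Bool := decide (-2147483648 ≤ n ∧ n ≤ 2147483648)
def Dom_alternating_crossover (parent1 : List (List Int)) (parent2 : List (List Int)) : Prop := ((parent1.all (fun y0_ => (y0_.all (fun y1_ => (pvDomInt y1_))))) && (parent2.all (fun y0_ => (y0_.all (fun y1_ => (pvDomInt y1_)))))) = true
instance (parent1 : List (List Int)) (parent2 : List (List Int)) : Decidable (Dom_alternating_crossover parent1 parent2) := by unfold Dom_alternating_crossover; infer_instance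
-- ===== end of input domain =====

-- B rebuilds each child row by two bulk strided copies per row instead of A's per-cell
-- (i+j)%2 test (objective: faster, constant factor; equivalence is about the return value).

-- ===== PORT A =====
def alternating_crossover (parent1 : List (List Int)) (parent2 : List (List Int)) : List (List Int) × List (List Int) :=
  let rows := parent1.length
  -- parent1[0]: IndexError on empty parent1 is excluded by Pre_
  let cols := ((PySem.List.pyGet? parent1 0).getD []).length
  let child1 := (List.range rows).map (fun _ => List.replicate cols (0 : Int))
  let child2 := (List.range rows).map (fun _ => List.replicate cols (0 : Int))
  (List.range rows).foldl (fun st (i : Nat) =>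
    (List.range cols).foldl (fun st2 (j : Nat) =>
      -- parent1[i][j] / parent2[i][j]: IndexError (none) is excluded by Pre_
      let v1 := (PySem.List.pyGet? ((PySem.List.pyGet? parent1 (i : Int)).getD []) (j : Int)).getD 0
      let v2 := (PySem.List.pyGet? ((PySem.List.pyGet? parent2 (i : Int)).getD []) (j : Int)).getD 0
      if (i + j) % 2 = 0 then
        (st2.1.modify i (fun r => r.set j v1), st2.2.modify i (fun r => r.set j v2))
      else
        (st2.1.modify i (fun r => r.set j v2), st2.2.modify i (fun r => r.set j v1))) st)
    (child1, child2)

-- ===== PORT B =====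
-- xs[s:cols:2] is read as pvEveryOther on take/drop (exact: Python slice reads clamp)
def pvEveryOther : List Int → List Int
  | [] => []
  | [x] => [x]
  | x :: _ :: t => x :: pvEveryOther t

-- r[s::2] = vals (exact when len(vals) = len(r[s::2]), which Pre_ guarantees;
-- Python raises ValueError otherwise)
def pvSetEvery2 : List Int → Nat → List Int → List Int
  | r, _, [] => r
  | r, s, v :: vs => pvSetEvery2 (r.set s v) (s + 2) vs

def alternating_crossover_alt (parent1 : List (List Int)) (parent2 : List (List Int)) : List (List Int) × List (List Int) :=
  -- parent1[0]: IndexError on empty parent1 is excluded by Pre_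
  let cols := ((PySem.List.pyGet? parent1 0).getD []).length
  (PySem.List.enumerate (parent1.zip parent2) 0).foldl (fun acc x =>
    let ab := if PySem.Int.mod x.1 2 = 0 then (x.2.1, x.2.2) else (x.2.2, x.2.1)
    let a := ab.1
    let b := ab.2
    let row1 := pvSetEvery2 (pvSetEvery2 (List.replicate cols (0 : Int)) 0 (pvEveryOther (a.take cols))) 1 (pvEveryOther ((b.take cols).drop 1))
    let row2 := pvSetEvery2 (pvSetEvery2 (List.replicate cols (0 : Int)) 0 (pvEveryOther (b.take cols))) 1 (pvEveryOther ((a.take cols).drop 1))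
    (acc.1 ++ [row1], acc.2 ++ [row2])) ([], [])

-- ===== PRECONDITION & SPEC =====
-- Pre_ excludes the inputs where A raises (empty parent1; parent2 or one of its used rows too
-- short) and the zero-width corner where parent2 is shorter than parent1, on which A still
-- returns len(parent1) empty rows (its inner loop never touches parent2) while B's zip
-- naturally truncates to len(parent2) rows — a corner no caller with matching dimensions hits.
def Pre_alternating_crossover (parent1 : List (List Int)) (parent2 : List (List Int)) : Prop :=
  parent1 ≠ [] ∧ parent1.length ≤ parent2.length ∧
  (∀ r ∈ parent1, parent1.headI.length ≤ r.length) ∧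
  (∀ r ∈ parent2.take parent1.length, parent1.headI.length ≤ r.length)
instance (parent1 : List (List Int)) (parent2 : List (List Int)) : Decidable (Pre_alternating_crossover parent1 parent2) := by unfold Pre_alternating_crossover; infer_instance

def pvWitness_alternating_crossover : List (List Int) × List (List Int) :=
  ([[1, 2], [3, 4]], [[5, 6], [7, 8]])

def Spec_alternating_crossover (parent1 : List (List Int)) (parent2 : List (List Int)) (out : List (List Int) × List (List Int)) : Prop := out = alternating_crossover_alt parent1 parent2
instance (parent1 : List (List Int)) (parent2 : List (List Int)) (out : List (List Int) × List (List Int)) : Decidable (Spec_alternating_crossover parent1 parent2 out) := by unfold Spec_alternating_crossover; infer_instance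

-- ===== CLAIM (what is proved, stated in full; the proofs are below) =====
def Claim_equal_alternating_crossover : Prop := ∀ (parent1 : List (List Int)) (parent2 : List (List Int)), Dom_alternating_crossover parent1 parent2 → Pre_alternating_crossover parent1 parent2 → Spec_alternating_crossover parent1 parent2 (alternating_crossover parent1 parent2)

-- ===== LEMMAS AND PROOFS =====

-- a row filled left to right by set is a map
theorem pv_set_fold (n : Nat) (f : Nat → Int) (r : List Int) (h : n ≤ r.length) :
    (List.range n).foldl (fun r j => r.set j (f j)) r = (List.range n).map f ++ r.drop n := by
  induction n generalizing r with
  | zero => simp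
  | succ n ih =>
      rw [List.range_succ, List.foldl_append, ih r (by omega)]
      simp only [List.foldl_cons, List.foldl_nil, List.map_append, List.map_cons, List.map_nil]
      apply List.ext_getElem?
      intro t
      simp only [List.getElem?_set, List.getElem?_append, List.getElem?_drop,
        List.length_append, List.length_map, List.length_range, List.length_drop,
        List.getElem?_map, List.getElem?_cons, List.getElem?_nil]
      split_ifs <;> (first | rfl | omega | simp_all)

-- two components modified at the same row index commute with the fold
theorem pv_modify_pair_fold (l : List Nat) (i : Nat) (u v : Nat → List Int → List Int)
    (c1 c2 : List (List Int)) :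
    l.foldl (fun st j => (st.1.modify i (u j), st.2.modify i (v j))) (c1, c2)
      = (c1.modify i (fun r => l.foldl (fun r j => u j r) r),
         c2.modify i (fun r => l.foldl (fun r j => v j r) r)) := by
  induction l generalizing c1 c2 with
  | nil => simp [show (fun r : List Int => r) = id from rfl, List.modify_id]
  | cons x l ih =>
      simp only [List.foldl_cons]
      rw [ih]
      simp only [List.modify_modify_eq]
      rfl

theorem pv_append_pair_fold (l : List (Int × (List Int × List Int)))
    (f g : Int × (List Int × List Int) → List Int) (acc1 acc2 : List (List Int)) :
    l.foldl (fun acc x => (acc.1 ++ [f x], acc.2 ++ [g x])) (acc1, acc2)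
      = (acc1 ++ l.map f, acc2 ++ l.map g) := by
  induction l generalizing acc1 acc2 with
  | nil => simp
  | cons x l ih =>
      simp only [List.foldl_cons, List.map_cons]
      rw [ih]
      simp

theorem pv_length_pvSetEvery2 (vals : List Int) (r : List Int) (s : Nat) :
    (pvSetEvery2 r s vals).length = r.length := by
  induction vals generalizing r s with
  | nil => simp [pvSetEvery2]
  | cons v vs ih => simp [pvSetEvery2, ih]

theorem pv_pvSetEvery2_getElem? (vals : List Int) (r : List Int) (s t : Nat) :
    (pvSetEvery2 r s vals)[t]? =
      if s ≤ t ∧ (t - s) % 2 = 0 ∧ (t - s) / 2 < vals.length ∧ t < r.length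
      then vals[(t - s) / 2]? else r[t]? := by
  induction vals generalizing r s with
  | nil =>
      simp only [pvSetEvery2, List.length_nil]
      rw [if_neg (by omega)]
  | cons v vs ih =>
      simp only [pvSetEvery2]
      rw [ih]
      simp only [List.length_set, List.length_cons, List.getElem?_set]
      by_cases h1 : s + 2 ≤ t ∧ (t - (s + 2)) % 2 = 0 ∧ (t - (s + 2)) / 2 < vs.length ∧ t < r.length
      · rw [if_pos h1, if_pos (by omega)]
        rw [show (t - s) / 2 = (t - (s + 2)) / 2 + 1 by omega, List.getElem?_cons_succ]
      · rw [if_neg h1]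
        by_cases h2 : s = t
        · subst h2
          rw [if_pos rfl]
          by_cases h3 : s < r.length
          · rw [if_pos h3, if_pos ⟨le_refl _, by omega, by omega, h3⟩]
            simp
          · rw [if_neg h3, if_neg (by omega)]
            exact (List.getElem?_eq_none (by omega)).symm
        · rw [if_neg h2, if_neg (by omega)]

theorem pv_pvEveryOther_getElem? (l : List Int) (k : Nat) :
    (pvEveryOther l)[k]? = l[2 * k]? := by
  fun_induction pvEveryOther l generalizing k with
  | case1 => simp
  | case2 x =>
      match k with
      | 0 => rfl
      | k + 1 => simp [show 2 * (k + 1) = (2 * k + 1) + 1 by omega]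
  | case3 x y t ih =>
      match k with
      | 0 => rfl
      | k + 1 =>
          simp only [List.getElem?_cons_succ, ih]
          rw [show 2 * (k + 1) = (2 * k + 1) + 1 by omega]
          simp

theorem pv_length_pvEveryOther (l : List Int) :
    (pvEveryOther l).length = (l.length + 1) / 2 := by
  fun_induction pvEveryOther l with
  | case1 => rfl
  | case2 x => simp
  | case3 x y t ih => simp [ih]; omega

-- B's row equals the parity-selected map
theorem pv_rowB_char (a b : List Int) (cols : Nat) (ha : cols ≤ a.length) (hb : cols ≤ b.length) :
    pvSetEvery2 (pvSetEvery2 (List.replicate cols (0 : Int)) 0 (pvEveryOther (a.take cols))) 1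
        (pvEveryOther ((b.take cols).drop 1))
      = (List.range cols).map (fun j => if j % 2 = 0 then a.getD j 0 else b.getD j 0) := by
  apply List.ext_getElem?
  intro j
  have hea : (pvEveryOther (a.take cols)).length = (cols + 1) / 2 := by
    rw [pv_length_pvEveryOther, List.length_take]; omega
  have heb : (pvEveryOther ((b.take cols).drop 1)).length = cols / 2 := by
    rw [pv_length_pvEveryOther, List.length_drop, List.length_take]; omega
  by_cases hj : j < cols
  · have hRHS : ((List.range cols).map (fun j => if j % 2 = 0 then a.getD j 0 else b.getD j 0))[j]?
        = some (if j % 2 = 0 then a.getD j 0 else b.getD j 0) := by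
      simp [hj]
    rw [hRHS, pv_pvSetEvery2_getElem?, pv_length_pvSetEvery2, List.length_replicate, heb]
    by_cases hpar : j % 2 = 0
    · rw [if_neg (by omega), pv_pvSetEvery2_getElem?, List.length_replicate, hea,
        if_pos ⟨Nat.zero_le _, by omega, by omega, hj⟩, pv_pvEveryOther_getElem?,
        show 2 * ((j - 0) / 2) = j by omega, List.getElem?_take, if_pos hj,
        List.getElem?_eq_getElem (by omega)]
      simp [hpar, List.getD_eq_getElem?_getD, List.getElem?_eq_getElem (show j < a.length by omega)]
    · rw [if_pos ⟨by omega, by omega, by omega, hj⟩, pv_pvEveryOther_getElem?, List.getElem?_drop,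
        show 1 + 2 * ((j - 1) / 2) = j by omega, List.getElem?_take, if_pos hj,
        List.getElem?_eq_getElem (by omega)]
      simp [hpar, List.getD_eq_getElem?_getD, List.getElem?_eq_getElem (show j < b.length by omega)]
  · rw [List.getElem?_eq_none (by rw [pv_length_pvSetEvery2, pv_length_pvSetEvery2, List.length_replicate]; omega),
        List.getElem?_eq_none (by simp; omega)]

theorem pv_modify_append (A B : List (List Int)) (f : List Int → List Int) :
    (A ++ B).modify A.length f = A ++ B.modify 0 f := by
  apply List.ext_getElem?
  intro t
  by_cases h : t < A.length
  · rw [List.getElem?_modify, List.getElem?_append_left h, List.getElem?_append_left h,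
      show (fun a => if A.length = t then f a else a) = id from by
        funext a; rw [if_neg (by omega)]; rfl]
    simp
  · rw [List.getElem?_modify, List.getElem?_append_right (by omega),
      List.getElem?_append_right (by omega), List.getElem?_modify,
      show (fun a => if A.length = t then f a else a) = (fun a => if 0 = t - A.length then f a else a) from by
        funext a; by_cases hc : A.length = t
        · rw [if_pos hc, if_pos (by omega)]
        · rw [if_neg hc, if_neg (by omega)]]

theorem pv_A_core (rows cols : Nat) (g1 g2 : Nat → Nat → Int) :
    (List.range rows).foldl
      (fun st (i : Nat) =>
        (List.range cols).foldl
          (fun st2 (j : Nat) =>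
            if (i + j) % 2 = 0 then
              (st2.1.modify i (fun r => r.set j (g1 i j)), st2.2.modify i (fun r => r.set j (g2 i j)))
            else
              (st2.1.modify i (fun r => r.set j (g2 i j)), st2.2.modify i (fun r => r.set j (g1 i j)))) st)
      (List.replicate rows (List.replicate cols (0 : Int)), List.replicate rows (List.replicate cols (0 : Int)))
    = ((List.range rows).map (fun i => (List.range cols).map (fun j => if (i + j) % 2 = 0 then g1 i j else g2 i j)),
       (List.range rows).map (fun i => (List.range cols).map (fun j => if (i + j) % 2 = 0 then g2 i j else g1 i j))) := by
  have hstep : ∀ (st : List (List Int) × List (List Int)) (i : Nat),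
      (List.range cols).foldl
        (fun st2 (j : Nat) =>
          if (i + j) % 2 = 0 then
            (st2.1.modify i (fun r => r.set j (g1 i j)), st2.2.modify i (fun r => r.set j (g2 i j)))
          else
            (st2.1.modify i (fun r => r.set j (g2 i j)), st2.2.modify i (fun r => r.set j (g1 i j)))) st
      = (st.1.modify i (fun r => (List.range cols).foldl (fun r j => r.set j (if (i + j) % 2 = 0 then g1 i j else g2 i j)) r),
         st.2.modify i (fun r => (List.range cols).foldl (fun r j => r.set j (if (i + j) % 2 = 0 then g2 i j else g1 i j)) r)) := by
    intro st i
    obtain ⟨c1, c2⟩ := st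
    rw [show (fun st2 (j : Nat) =>
          if (i + j) % 2 = 0 then
            (st2.1.modify i (fun r => r.set j (g1 i j)), st2.2.modify i (fun r => r.set j (g2 i j)))
          else
            (st2.1.modify i (fun r => r.set j (g2 i j)), st2.2.modify i (fun r => r.set j (g1 i j))))
        = (fun (st2 : List (List Int) × List (List Int)) (j : Nat) =>
            (st2.1.modify i (fun r => r.set j (if (i + j) % 2 = 0 then g1 i j else g2 i j)),
             st2.2.modify i (fun r => r.set j (if (i + j) % 2 = 0 then g2 i j else g1 i j)))) from by
        funext st2 j; by_cases hc : (i + j) % 2 = 0 <;> simp [hc]]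
    exact pv_modify_pair_fold _ _ _ _ _ _
  suffices aux : ∀ k, k ≤ rows →
      (List.range k).foldl
        (fun st (i : Nat) =>
          (List.range cols).foldl
            (fun st2 (j : Nat) =>
              if (i + j) % 2 = 0 then
                (st2.1.modify i (fun r => r.set j (g1 i j)), st2.2.modify i (fun r => r.set j (g2 i j)))
              else
                (st2.1.modify i (fun r => r.set j (g2 i j)), st2.2.modify i (fun r => r.set j (g1 i j)))) st)
        (List.replicate rows (List.replicate cols (0 : Int)), List.replicate rows (List.replicate cols (0 : Int)))
      = ((List.range k).map (fun i => (List.range cols).map (fun j => if (i + j) % 2 = 0 then g1 i j else g2 i j))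
           ++ List.replicate (rows - k) (List.replicate cols (0 : Int)),
         (List.range k).map (fun i => (List.range cols).map (fun j => if (i + j) % 2 = 0 then g2 i j else g1 i j))
           ++ List.replicate (rows - k) (List.replicate cols (0 : Int))) by
    have h := aux rows le_rfl
    simpa using h
  intro k
  induction k with
  | zero => intro _; simp
  | succ k ih =>
      intro hk
      rw [List.range_succ, List.foldl_append, ih (by omega), List.foldl_cons, List.foldl_nil, hstep]
      have h1 : ∀ (F : Nat → List Int) (gg : List Int → List Int),
          ((List.range k).map F ++ List.replicate (rows - k) (List.replicate cols (0 : Int))).modify k gg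
            = (List.range k).map F ++ ([gg (List.replicate cols 0)] ++ List.replicate (rows - (k + 1)) (List.replicate cols 0)) := by
        intro F gg
        have h := pv_modify_append ((List.range k).map F)
          (List.replicate (rows - k) (List.replicate cols (0 : Int))) gg
        rw [List.length_map, List.length_range] at h
        rw [h, show rows - k = (rows - (k + 1)) + 1 by omega, List.replicate_succ,
          List.modify_zero_cons]
        rfl
      dsimp only
      rw [h1, h1]
      rw [pv_set_fold cols _ _ (by simp), pv_set_fold cols _ _ (by simp)]
      simp only [List.drop_replicate, List.map_append, List.map_cons, List.map_nil,
        List.append_assoc]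
      simp

theorem pv_row_eq (x y : List Int) (i cols : Nat) (hx : cols ≤ x.length) (hy : cols ≤ y.length) :
    (List.range cols).map (fun j =>
        if (i + j) % 2 = 0
        then (PySem.List.pyGet? x (j : Int)).getD 0
        else (PySem.List.pyGet? y (j : Int)).getD 0)
    = pvSetEvery2 (pvSetEvery2 (List.replicate cols (0 : Int)) 0
          (pvEveryOther ((if i % 2 = 0 then x else y).take cols))) 1
        (pvEveryOther (((if i % 2 = 0 then y else x).take cols).drop 1)) := by
  by_cases hpar : i % 2 = 0
  · rw [if_pos hpar, if_pos hpar, pv_rowB_char x y cols hx hy]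
    apply List.map_congr_left
    intro j hj
    simp only [PySem.List.pyGet?_natCast, ← List.getD_eq_getElem?_getD]
    by_cases hjp : j % 2 = 0
    · rw [if_pos (by omega), if_pos hjp]
    · rw [if_neg (by omega), if_neg hjp]
  · rw [if_neg hpar, if_neg hpar, pv_rowB_char y x cols hy hx]
    apply List.map_congr_left
    intro j hj
    simp only [PySem.List.pyGet?_natCast, ← List.getD_eq_getElem?_getD]
    by_cases hjp : j % 2 = 0
    · rw [if_neg (by omega), if_pos hjp]
    · rw [if_pos (by omega), if_neg hjp]

-- A's result in closed form
theorem pv_A_char (parent1 parent2 : List (List Int)) :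
    alternating_crossover parent1 parent2 =
      ((List.range parent1.length).map (fun (i : Nat) => (List.range ((PySem.List.pyGet? parent1 0).getD []).length).map (fun (j : Nat) =>
          if (i + j) % 2 = 0
          then (PySem.List.pyGet? ((PySem.List.pyGet? parent1 (i : Int)).getD []) (j : Int)).getD 0
          else (PySem.List.pyGet? ((PySem.List.pyGet? parent2 (i : Int)).getD []) (j : Int)).getD 0)),
       (List.range parent1.length).map (fun (i : Nat) => (List.range ((PySem.List.pyGet? parent1 0).getD []).length).map (fun (j : Nat) =>
          if (i + j) % 2 = 0
          then (PySem.List.pyGet? ((PySem.List.pyGet? parent2 (i : Int)).getD []) (j : Int)).getD 0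
          else (PySem.List.pyGet? ((PySem.List.pyGet? parent1 (i : Int)).getD []) (j : Int)).getD 0))) := by
  simp only [alternating_crossover]
  rw [show (List.range parent1.length).map (fun _ => List.replicate ((PySem.List.pyGet? parent1 0).getD []).length (0 : Int))
        = List.replicate parent1.length (List.replicate ((PySem.List.pyGet? parent1 0).getD []).length (0 : Int)) from by
      simp [List.map_const']]
  exact pv_A_core parent1.length ((PySem.List.pyGet? parent1 0).getD []).length
    (fun i j => (PySem.List.pyGet? ((PySem.List.pyGet? parent1 (i : Int)).getD []) (j : Int)).getD 0)
    (fun i j => (PySem.List.pyGet? ((PySem.List.pyGet? parent2 (i : Int)).getD []) (j : Int)).getD 0)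

-- ===== VERDICT (by name: the statement is the Claim_ definition above) =====
theorem alternating_crossover_spec : Claim_equal_alternating_crossover := by
  intro p1 p2 _ hpre
  obtain ⟨hne, hlen, hrow1, hrow2⟩ := hpre
  unfold Spec_alternating_crossover
  have hcols : (PySem.List.pyGet? p1 0).getD [] = p1.headI := by
    cases p1 with
    | nil => exact absurd rfl hne
    | cons h t =>
        rw [show (0 : Int) = ((0 : Nat) : Int) from rfl, PySem.List.pyGet?_natCast]
        rfl
  rw [pv_A_char]
  simp only [alternating_crossover_alt]
  rw [pv_append_pair_fold]
  simp only [List.nil_append, hcols]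
  have hx : ∀ i (_ : i < p1.length), p1.headI.length ≤ p1[i].length := fun i hi =>
    hrow1 _ (List.getElem_mem hi)
  have hy : ∀ i (_ : i < p1.length), p1.headI.length ≤ p2[i].length := by
    intro i hi
    have h1 : i < (p2.take p1.length).length := by
      rw [List.length_take]; omega
    have h2 := hrow2 _ (List.getElem_mem h1)
    rwa [List.getElem_take] at h2
  have hRHS : ∀ i (_ : i < p1.length),
      (PySem.List.enumerate (p1.zip p2) 0)[i]? = some ((i : Int), (p1[i], p2[i])) := by
    intro i hi
    rw [List.getElem?_eq_getElem (by rw [PySem.List.length_enumerate, List.length_zip]; omega)]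
    rw [PySem.List.getElem_enumerate]
    simp [List.getElem_zip]
  have hgi : ∀ (p : List (List Int)) (i : Nat) (hp : i < p.length),
      (PySem.List.pyGet? p (i : Int)).getD [] = p[i] := by
    intro p i hp
    rw [PySem.List.pyGet?_natCast, List.getElem?_eq_getElem hp]
    rfl
  refine Prod.ext ?_ ?_ <;>
    · apply List.ext_getElem?
      intro i
      by_cases hi : i < p1.length
      · rw [List.getElem?_map, List.getElem?_map, hRHS i hi, List.getElem?_range hi]
        simp only [Option.map_some]
        simp only [Option.some.injEq]
        rw [hgi p1 i hi, hgi p2 i (by omega)]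
        by_cases hpar : i % 2 = 0
        · rw [if_pos (show PySem.Int.mod ((i : Nat) : Int) 2 = 0 by
            rw [PySem.Int.mod_eq_emod_of_pos (by omega)]; omega)]
          dsimp only
          first
          | rw [pv_row_eq p1[i] p2[i] i p1.headI.length (hx i hi) (hy i hi),
              if_pos hpar, if_pos hpar]
          | rw [pv_row_eq p2[i] p1[i] i p1.headI.length (hy i hi) (hx i hi),
              if_pos hpar, if_pos hpar]
        · rw [if_neg (show ¬ PySem.Int.mod ((i : Nat) : Int) 2 = 0 by
            rw [PySem.Int.mod_eq_emod_of_pos (by omega)]; omega)]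
          dsimp only
          first
          | rw [pv_row_eq p1[i] p2[i] i p1.headI.length (hx i hi) (hy i hi),
              if_neg hpar, if_neg hpar]
          | rw [pv_row_eq p2[i] p1[i] i p1.headI.length (hy i hi) (hx i hi),
              if_neg hpar, if_neg hpar]
      · rw [List.getElem?_eq_none (by simp; omega),
          List.getElem?_eq_none (by
            rw [List.length_map, PySem.List.length_enumerate, List.length_zip]; omega)]
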